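-- pv_equiv track=rewrite | github.com/MixKage/ruins_secret_of_death | bot/story.py | apply_slash_style
-- ===== SOURCE A (Python) =====
-- def apply_slash_style(text: str) -> str:
--     lines = [line.strip() for line in text.splitlines() if line.strip()]
--     if not lines:
--         return ""
--     formatted: list[str] = []
--     for idx, line in enumerate(lines, start=1):
--         formatted.append(line)
--         if idx % 4 == 0 and idx != len(lines):
--             formatted.append("")
--     return "<i>" + "\n".join(formatted) + "</i>"
-- ===== SOURCE B (Python) =====
-- def apply_slash_style(text: str) -> str:
--     lines = [line.strip() for line in text.splitlines() if line.strip()]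
--     if not lines:
--         return ""
--     chunks = ["\n".join(lines[i:i + 4]) for i in range(0, len(lines), 4)]
--     return "<i>" + "\n\n".join(chunks) + "</i>"
-- ===== Notes on version B (the rewrite author's own statement) =====
-- stated objective: simpler
-- what changed: B slices the stripped lines into groups of four and joins the groups with a double-newline separator, instead of A's enumerate-indexed scan that conditionally appends empty separator strings during the loop.
import Mathlib
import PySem

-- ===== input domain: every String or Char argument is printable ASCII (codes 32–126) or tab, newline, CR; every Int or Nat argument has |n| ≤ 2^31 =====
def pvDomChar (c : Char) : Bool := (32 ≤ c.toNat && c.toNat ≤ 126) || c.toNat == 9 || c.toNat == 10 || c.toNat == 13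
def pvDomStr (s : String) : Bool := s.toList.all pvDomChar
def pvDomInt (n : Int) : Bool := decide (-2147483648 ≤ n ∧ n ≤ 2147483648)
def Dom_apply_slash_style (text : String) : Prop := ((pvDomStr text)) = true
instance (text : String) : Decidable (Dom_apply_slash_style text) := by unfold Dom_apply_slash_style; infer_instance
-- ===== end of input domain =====

-- B replaces A's enumerate-indexed scan (which conditionally appends "" separators inside the
-- loop) by slicing the lines into chunks of four and joining the chunks with "\n\n"; simpler.

-- ===== PORT A =====
def apply_slash_style (text : String) : String :=
  let lines := ((PySem.Str.splitlines text).map PySem.Str.strip).filter (fun l => l != "")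
  if lines = [] then ""
  else
    let formatted := (PySem.List.enumerate lines 1).foldl
      (fun acc p =>
        let acc2 := acc ++ [p.2]
        if PySem.Int.mod p.1 4 == 0 && p.1 != (lines.length : Int) then acc2 ++ [""] else acc2)
      ([] : List String)
    "<i>" ++ PySem.Str.join "\n" formatted ++ "</i>"

-- ===== PORT B =====
def apply_slash_style_alt (text : String) : String :=
  let lines := ((PySem.Str.splitlines text).map PySem.Str.strip).filter (fun l => l != "")
  if lines = [] then ""
  else
    let chunks := (PySem.List.pyRange 0 (lines.length : Int) 4).map
      (fun i => PySem.Str.join "\n" (PySem.List.slice lines (some i) (some (i + 4))))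
    "<i>" ++ PySem.Str.join "\n\n" chunks ++ "</i>"

-- ===== PRECONDITION & SPEC =====
def Spec_apply_slash_style (text : String) (out : String) : Prop := out = apply_slash_style_alt text
instance (text : String) (out : String) : Decidable (Spec_apply_slash_style text out) := by unfold Spec_apply_slash_style; infer_instance

-- ===== CLAIM (what is proved, stated in full; the proofs are below) =====
def Claim_equal_apply_slash_style : Prop := ∀ (text : String), Dom_apply_slash_style text → Spec_apply_slash_style text (apply_slash_style text)

-- ===== LEMMAS AND PROOFS =====

-- canonical form both sides reduce to: the blocks of four joined with a "\n\n" between blocks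
def chunkJoin (lines : List String) : String :=
  if lines.length ≤ 4 then PySem.Str.join "\n" lines
  else PySem.Str.join "\n" (lines.take 4) ++ "\n\n" ++ chunkJoin (lines.drop 4)
termination_by lines.length
decreasing_by simp; omega

theorem str_join_cons_cons (sep x y : String) (xs : List String) :
    PySem.Str.join sep (x :: y :: xs) = x ++ sep ++ PySem.Str.join sep (y :: xs) := by
  rw [← String.toList_inj]
  simp [PySem.Str.toList_join, PySem.Chars.join_cons_cons, String.toList_append]

theorem str_join_cons (sep x : String) (xs : List String) (h : xs ≠ []) :
    PySem.Str.join sep (x :: xs) = x ++ sep ++ PySem.Str.join sep xs := by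
  obtain ⟨y, ys, rfl⟩ := List.exists_cons_of_ne_nil h
  exact str_join_cons_cons sep x y ys

-- join "\n" over l1 ++ "" :: l2 (l1, l2 nonempty) splits as a "\n\n" break
theorem join_nl_break (l1 l2 : List String) (h1 : l1 ≠ []) (h2 : l2 ≠ []) :
    PySem.Str.join "\n" (l1 ++ "" :: l2) =
      PySem.Str.join "\n" l1 ++ "\n\n" ++ PySem.Str.join "\n" l2 := by
  induction l1 with
  | nil => exact absurd rfl h1
  | cons x l1 ih =>
    cases l1 with
    | nil =>
      rw [show ([x] ++ "" :: l2) = x :: "" :: l2 from rfl, str_join_cons_cons,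
        str_join_cons _ _ _ h2, ← String.toList_inj]
      simp [PySem.Str.toList_join, String.toList_append]
    | cons z l1' =>
      rw [show ((x :: z :: l1') ++ "" :: l2) = x :: ((z :: l1') ++ "" :: l2) from rfl,
        str_join_cons _ _ _ (by simp), ih (by simp), str_join_cons_cons, ← String.toList_inj]
      simp [String.toList_append]

theorem fmod_four (x : Int) : PySem.Int.mod x 4 = x % 4 := by
  show x.fmod 4 = x % 4
  rw [Int.fmod_eq_emod]
  simp

-- the per-element contribution of A's loop, abstracted over the total length N
def aStep (N : Int) (p : Int × String) : List String :=
  if PySem.Int.mod p.1 4 == 0 && p.1 != N then [p.2, ""] else [p.2]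

theorem aStep_off (N s : Int) (x : String) (h : s % 4 ≠ 0) : aStep N (s, x) = [x] := by
  unfold aStep
  rw [if_neg]
  simp only [fmod_four, Bool.and_eq_true, beq_iff_eq, bne_iff_ne, not_and]
  intro hc
  exact absurd hc h

theorem aStep_on (N s : Int) (x : String) (h : s % 4 = 0) (hN : s ≠ N) :
    aStep N (s, x) = [x, ""] := by
  unfold aStep
  rw [if_pos]
  simp only [fmod_four, Bool.and_eq_true, beq_iff_eq, bne_iff_ne]
  exact ⟨h, hN⟩

theorem aStep_last (N : Int) (x : String) : aStep N (N, x) = [x] := by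
  unfold aStep
  rw [if_neg]
  simp

theorem aStep_ne_nil (N : Int) (p : Int × String) : aStep N p ≠ [] := by
  unfold aStep
  split <;> simp

set_option maxHeartbeats 1000000 in
theorem aside : ∀ (n : Nat) (lines : List String) (s N : Int), lines.length = n → lines ≠ [] →
    s % 4 = 1 → N = s - 1 + lines.length →
    PySem.Str.join "\n" ((PySem.List.enumerate lines s).flatMap (aStep N)) = chunkJoin lines := by
  intro n
  induction n using Nat.strong_induction_on with
  | _ n ih =>
    intro lines s N hlen hne hs hN
    rcases lines with _ | ⟨a, _ | ⟨b, _ | ⟨c, _ | ⟨d, _ | ⟨e, rest⟩⟩⟩⟩⟩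
    · exact absurd rfl hne
    · have hNs : N = s := by simp at hN; omega
      simp only [PySem.List.enumerate_cons, PySem.List.enumerate_nil, List.flatMap_cons,
        List.flatMap_nil, List.append_nil, hNs, aStep_last]
      conv_rhs => rw [chunkJoin]
      rw [if_pos (by simp)]
    · simp only [PySem.List.enumerate_cons, PySem.List.enumerate_nil, List.flatMap_cons,
        List.flatMap_nil, List.append_nil,
        aStep_off N s a (by omega), aStep_off N (s + 1) b (by omega)]
      conv_rhs => rw [chunkJoin]
      rw [if_pos (by simp)]
      rfl
    · simp only [PySem.List.enumerate_cons, PySem.List.enumerate_nil, List.flatMap_cons,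
        List.flatMap_nil, List.append_nil, aStep_off N s a (by omega),
        aStep_off N (s + 1) b (by omega), aStep_off N (s + 1 + 1) c (by omega)]
      conv_rhs => rw [chunkJoin]
      rw [if_pos (by simp)]
      rfl
    · have hNd : N = s + 1 + 1 + 1 := by simp at hN; omega
      simp only [PySem.List.enumerate_cons, PySem.List.enumerate_nil, List.flatMap_cons,
        List.flatMap_nil, List.append_nil, aStep_off N s a (by omega),
        aStep_off N (s + 1) b (by omega), aStep_off N (s + 1 + 1) c (by omega)]
      rw [show aStep N (s + 1 + 1 + 1, d) = [d] from hNd ▸ aStep_last N d]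
      conv_rhs => rw [chunkJoin]
      rw [if_pos (by simp)]
      rfl
    · have hN5 : N = s + 4 + rest.length := by simp at hN; omega
      simp only [PySem.List.enumerate_cons, List.flatMap_cons, aStep_off N s a (by omega),
        aStep_off N (s + 1) b (by omega), aStep_off N (s + 1 + 1) c (by omega)]
      rw [aStep_on N (s + 1 + 1 + 1) d (by omega) (by omega)]
      have hlt : rest.length + 1 < n := by simp at hlen; omega
      have htail := ih (rest.length + 1) hlt (e :: rest) (s + 4) N (by simp) (by simp)
        (by omega) (by simp; omega)
      rw [PySem.List.enumerate_cons, List.flatMap_cons] at htail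
      have h44 : s + 1 + 1 + 1 + 1 = s + 4 := by ring
      rw [h44]
      have hTne : aStep N (s + 4, e) ++
          List.flatMap (aStep N) (PySem.List.enumerate rest (s + 4 + 1)) ≠ [] := fun h =>
        aStep_ne_nil N (s + 4, e) (List.append_eq_nil_iff.mp h).1
      have hshape : [a] ++ ([b] ++ ([c] ++ ([d, ""] ++ (aStep N (s + 4, e) ++
          List.flatMap (aStep N) (PySem.List.enumerate rest (s + 4 + 1)))))) =
          [a, b, c, d] ++ "" :: (aStep N (s + 4, e) ++
          List.flatMap (aStep N) (PySem.List.enumerate rest (s + 4 + 1))) := by simp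
      rw [hshape, join_nl_break _ _ (by simp) hTne, htail]
      conv_rhs => rw [chunkJoin]
      rw [if_neg (by simp)]
      rfl

-- B's chunk comprehension, reindexed to drop/take, equals chunkJoin
theorem bside : ∀ (n : Nat) (lines : List String), lines.length = n → lines ≠ [] →
    PySem.Str.join "\n\n" ((List.range ((lines.length + 3) / 4)).map
      (fun k => PySem.Str.join "\n" ((lines.drop (4 * k)).take 4))) = chunkJoin lines := by
  intro n
  induction n using Nat.strong_induction_on with
  | _ n ih =>
    intro lines hlen hne
    have hpos : 0 < lines.length := List.length_pos_of_ne_nil hne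
    by_cases h4 : lines.length ≤ 4
    · have hK : (lines.length + 3) / 4 = 1 := by omega
      rw [hK]
      simp only [List.range_one, List.map_cons, List.map_nil, Nat.mul_zero, List.drop_zero]
      rw [List.take_of_length_le h4]
      conv_rhs => rw [chunkJoin]
      rw [if_pos h4, ← String.toList_inj]
      simp [PySem.Str.toList_join, PySem.Chars.join_singleton]
    · have hK : (lines.length + 3) / 4 = ((lines.drop 4).length + 3) / 4 + 1 := by
        simp; omega
      rw [hK, List.range_succ_eq_map, List.map_cons, List.map_map]
      have hmap : (List.map ((fun k => PySem.Str.join "\n" ((lines.drop (4 * k)).take 4)) ∘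
            Nat.succ) (List.range (((lines.drop 4).length + 3) / 4))) =
          (List.map (fun k => PySem.Str.join "\n" (((lines.drop 4).drop (4 * k)).take 4))
            (List.range (((lines.drop 4).length + 3) / 4))) := by
        refine List.map_congr_left fun k hk => ?_
        have hdd : lines.drop (4 * Nat.succ k) = (lines.drop 4).drop (4 * k) := by
          rw [List.drop_drop]
          congr 1
          omega
        simp only [Function.comp, hdd]
      rw [hmap]
      have hrec := ih (lines.drop 4).length (by simp [hlen]; omega) (lines.drop 4) rfl
        (by intro hnil; have := congrArg List.length hnil; simp at this; omega)
      have hKne : (List.map (fun k => PySem.Str.join "\n" (((lines.drop 4).drop (4 * k)).take 4))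
          (List.range (((lines.drop 4).length + 3) / 4))) ≠ [] := by
        simp only [ne_eq, List.map_eq_nil_iff, List.range_eq_nil, List.length_drop]
        omega
      rw [str_join_cons _ _ _ hKne, hrec]
      conv_rhs => rw [chunkJoin]
      rw [if_neg h4]
      simp

theorem apply_slash_style_spec : Claim_equal_apply_slash_style := by
  intro text _
  unfold Spec_apply_slash_style
  simp only [apply_slash_style, apply_slash_style_alt]
  by_cases hne : ((PySem.Str.splitlines text).map PySem.Str.strip).filter (fun l => l != "") = []
  · rw [if_pos hne, if_pos hne]
  · rw [if_neg hne, if_neg hne]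
    generalize hl : ((PySem.Str.splitlines text).map PySem.Str.strip).filter (fun l => l != "") = lines at hne
    have hpos : 0 < lines.length := List.length_pos_of_ne_nil hne
    have hA : PySem.Str.join "\n" ((PySem.List.enumerate lines 1).foldl
        (fun acc p =>
          let acc2 := acc ++ [p.2]
          if PySem.Int.mod p.1 4 == 0 && p.1 != (lines.length : Int) then acc2 ++ [""] else acc2)
        ([] : List String)) = chunkJoin lines := by
      rw [List.foldl_ext _ (fun acc p => acc ++ aStep (lines.length : Int) p) _
        (fun acc p _ => by unfold aStep; split <;> (simp_all; try assumption))]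
      rw [PySem.List.foldl_append_eq_flatMap, List.nil_append]
      exact aside lines.length lines 1 lines.length rfl hne (by norm_num) (by simp)
    have hB : PySem.Str.join "\n\n" ((PySem.List.pyRange 0 (lines.length : Int) 4).map
        (fun i => PySem.Str.join "\n" (PySem.List.slice lines (some i) (some (i + 4))))) =
        chunkJoin lines := by
      rw [PySem.List.pyRange_of_pos 0 (lines.length : Int) (by norm_num)]
      rw [if_pos (by exact_mod_cast hpos)]
      have hc : (((lines.length : Int) - 0 + 4 - 1) / 4).toNat = (lines.length + 3) / 4 := by
        omega
      rw [hc, List.map_map]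
      have hmap : (List.map ((fun i => PySem.Str.join "\n"
            (PySem.List.slice lines (some i) (some (i + 4)))) ∘ (fun k : Nat => 0 + 4 * (k : Int)))
            (List.range ((lines.length + 3) / 4))) =
          (List.map (fun k => PySem.Str.join "\n" ((lines.drop (4 * k)).take 4))
            (List.range ((lines.length + 3) / 4))) := by
        refine List.map_congr_left fun k hk => ?_
        simp only [Function.comp, zero_add]
        have hsl := PySem.List.slice_natCast_add lines (4 * k) 4
        push_cast at hsl
        rw [hsl]
      rw [hmap]
      exact bside lines.length lines rfl hne
    rw [hA, hB]
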